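-- pv_equiv track=rewrite | github.com/musselmanjoey/DingerStats | src/utils/player_normalizer.py | normalize_player_name
-- ===== SOURCE A (Python) =====
-- PLAYER_MAPPINGS = {
--     'Tyler (WunderBears)': [
--         'tyler',
--         'wunderbear',
--         'wunderbears',
--         'wunderbear (kritnick)',
--     ],
--     'Dennis (PapaDen)': [
--         'dennis',
--         'papaden',
--         'papa den',
--         'dennis papaden',
--         'papaden (dennis)',
--         'dennis (papaden)',
--     ],
--     'Hunter (Hunter Gatherers)': [
--         'hunter',
--         'hunter g',
--         'hunter gatherers',
--     ],
--     'Jason (JK Jesters)': [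
--         'jason',
--         'jk jesters',
--         'jkjesters',
--         'jesters',
--         'jk',
--     ],
--     'Andrew (City Hall)': [
--         'andrew',
--         'city hall',
--         'cityhall',
--         'andrew (city hall)',
--     ],
--     'Nick (CritNick/Big Dog)': [
--         'nick',
--         'critnick',
--         'kritnick',
--         'crit nick',
--         'big dog',
--         'bigdog',
--         'big dog (nick)',
--     ],
--     'Joey (Mr Joe)': [
--         'joey',
--         'mr joe',
--         'mrjoe',
--         'mr. joe',
--     ],
-- }
--
-- def normalize_player_name(name):
--     """
--     Normalize a player/team name to its canonical form
--
--     Args: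
--         name: Raw player/team name from Gemini API
--
--     Returns:
--         Canonical player name
--     """
--     if not name:
--         return name
--
--     # Normalize for comparison: lowercase, strip whitespace
--     normalized_input = name.lower().strip()
--
--     # Check each canonical name's variations
--     for canonical, variations in PLAYER_MAPPINGS.items():
--         if normalized_input in variations:
--             return canonical
--
--     # If no mapping found, return original with proper capitalization
--     return name.strip()
-- ===== SOURCE B (Python) =====
-- PLAYER_MAPPINGS = {
--     'Tyler (WunderBears)': [
--         'tyler',
--         'wunderbear',
--         'wunderbears',
--         'wunderbear (kritnick)',
--     ],
--     'Dennis (PapaDen)': [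
--         'dennis',
--         'papaden',
--         'papa den',
--         'dennis papaden',
--         'papaden (dennis)',
--         'dennis (papaden)',
--     ],
--     'Hunter (Hunter Gatherers)': [
--         'hunter',
--         'hunter g',
--         'hunter gatherers',
--     ],
--     'Jason (JK Jesters)': [
--         'jason',
--         'jk jesters',
--         'jkjesters',
--         'jesters',
--         'jk',
--     ],
--     'Andrew (City Hall)': [
--         'andrew',
--         'city hall',
--         'cityhall',
--         'andrew (city hall)',
--     ],
--     'Nick (CritNick/Big Dog)': [
--         'nick',
--         'critnick',
--         'kritnick',
--         'crit nick',
--         'big dog',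
--         'bigdog',
--         'big dog (nick)',
--     ],
--     'Joey (Mr Joe)': [
--         'joey',
--         'mr joe',
--         'mrjoe',
--         'mr. joe',
--     ],
-- }
--
-- # Sorted (variation, canonical) table, built once; lookups are a binary search.
-- _TABLE = sorted(
--     ((v, c) for c, vs in PLAYER_MAPPINGS.items() for v in vs),
--     key=lambda p: p[0],
-- )
--
-- def normalize_player_name(name):
--     if not name:
--         return name
--     key = name.lower().strip()
--     # bisect_left over the sorted variation table (variations are unique)
--     lo, hi = 0, len(_TABLE)
--     while lo < hi:
--         mid = (lo + hi) // 2
--         if _TABLE[mid][0] < key: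
--             lo = mid + 1
--         else:
--             hi = mid
--     if lo < len(_TABLE) and _TABLE[lo][0] == key:
--         return _TABLE[lo][1]
--     return name.strip()
-- ===== Notes on version B (the rewrite author's own statement) =====
-- stated objective: alternative
-- what changed: Replaces the per-call linear scan over each canonical's variation list with a flat (variation, canonical) table sorted once at module load and a hand-written binary search (bisect_left) over it per lookup.
import Mathlib
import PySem

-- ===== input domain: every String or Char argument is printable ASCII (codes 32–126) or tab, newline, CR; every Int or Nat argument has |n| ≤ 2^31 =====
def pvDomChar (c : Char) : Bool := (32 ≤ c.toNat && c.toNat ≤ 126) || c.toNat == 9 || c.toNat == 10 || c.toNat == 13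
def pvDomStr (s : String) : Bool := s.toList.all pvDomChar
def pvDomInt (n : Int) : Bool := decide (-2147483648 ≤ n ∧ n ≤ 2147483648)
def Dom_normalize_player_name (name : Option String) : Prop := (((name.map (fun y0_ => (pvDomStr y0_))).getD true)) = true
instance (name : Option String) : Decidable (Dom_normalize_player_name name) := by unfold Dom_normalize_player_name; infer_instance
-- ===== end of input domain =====

-- B replaces A's per-call scan over each canonical's variation list with a flat
-- (variation, canonical) table sorted once plus a hand-written binary search; objective: alternative.

def PLAYER_MAPPINGS : List (String × List String) := [
  ("Tyler (WunderBears)", ["tyler", "wunderbear", "wunderbears", "wunderbear (kritnick)"]),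
  ("Dennis (PapaDen)", ["dennis", "papaden", "papa den", "dennis papaden", "papaden (dennis)", "dennis (papaden)"]),
  ("Hunter (Hunter Gatherers)", ["hunter", "hunter g", "hunter gatherers"]),
  ("Jason (JK Jesters)", ["jason", "jk jesters", "jkjesters", "jesters", "jk"]),
  ("Andrew (City Hall)", ["andrew", "city hall", "cityhall", "andrew (city hall)"]),
  ("Nick (CritNick/Big Dog)", ["nick", "critnick", "kritnick", "crit nick", "big dog", "bigdog", "big dog (nick)"]),
  ("Joey (Mr Joe)", ["joey", "mr joe", "mrjoe", "mr. joe"])]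

-- ===== PORT A =====
-- the 'for canonical, variations in PLAYER_MAPPINGS.items()' loop: first canonical whose
-- variations contain t, else the stripped original d
def pvLoopA : List (String × List String) → String → String → String
  | [], _, d => d
  | (canonical, variations) :: rest, t, d =>
    if variations.contains t then canonical else pvLoopA rest t d

def normalize_player_name (name : Option String) : Option String :=
  match name with
  | none => none                      -- 'if not name: return name' (None)
  | some s =>
    if s = "" then some s             -- 'if not name: return name' (empty string)
    else
      some (pvLoopA PLAYER_MAPPINGS (PySem.Str.strip (PySem.Str.lower s)) (PySem.Str.strip s))

-- ===== PORT B =====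
-- _TABLE = sorted(((v, c) for c, vs in PLAYER_MAPPINGS.items() for v in vs), key=lambda p: p[0])
def pvTABLE : List (String × String) :=
  PySem.List.sorted (PLAYER_MAPPINGS.flatMap (fun p => p.2.map (fun v => (v, p.1))))
    (fun p => p.1) false

-- the 'while lo < hi' bisect_left loop; _TABLE[mid] is always in range there, so the total
-- getD (default never read) is exact, and (lo+hi)//2 on the nonnegative lo, hi is Nat division
def pvBisect (T : List (String × String)) (t : String) (lo hi : Nat) : Nat :=
  if _h : lo < hi then
    let mid := (lo + hi) / 2
    if (T.getD mid ("", "")).1 < t then pvBisect T t (mid + 1) hi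
    else pvBisect T t lo mid
  else lo
termination_by hi - lo
decreasing_by all_goals omega

def normalize_player_name_alt (name : Option String) : Option String :=
  match name with
  | none => none
  | some s =>
    if s = "" then some s
    else
      let key := PySem.Str.strip (PySem.Str.lower s)
      let lo := pvBisect pvTABLE key 0 pvTABLE.length
      if lo < pvTABLE.length ∧ (pvTABLE.getD lo ("", "")).1 = key then
        some (pvTABLE.getD lo ("", "")).2
      else some (PySem.Str.strip s)

-- ===== PRECONDITION & SPEC =====
def Spec_normalize_player_name (name : Option String) (out : Option String) : Prop := out = normalize_player_name_alt name
instance (name : Option String) (out : Option String) : Decidable (Spec_normalize_player_name name out) := by unfold Spec_normalize_player_name; infer_instance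

-- ===== CLAIM (what is proved, stated in full; the proofs are below) =====
def Claim_equal_normalize_player_name : Prop := ∀ (name : Option String), Dom_normalize_player_name name → Spec_normalize_player_name name (normalize_player_name name)

-- ===== LEMMAS AND PROOFS =====

-- the flattened (variation, canonical) association list, in A's scan order
def pvFlat : List (String × String) :=
  PLAYER_MAPPINGS.flatMap (fun p => p.2.map (fun v => (v, p.1)))

-- lookup in a block that maps each of vs to c: hit iff t ∈ vs, else continue
theorem pv_lookup_group (vs : List String) (c t : String) (rest : List (String × String)) :
    List.lookup t (vs.map (fun v => (v, c)) ++ rest)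
      = if vs.contains t then some c else List.lookup t rest := by
  induction vs with
  | nil => simp
  | cons v vs ih =>
    by_cases h : t = v
    · simp [h]
    · have hb : (t == v) = false := beq_false_of_ne h
      simp [List.lookup, hb, ih, h]

-- A's scan = first-match lookup in the flattened list
theorem pvLoopA_eq_flat (L : List (String × List String)) (t d : String) :
    pvLoopA L t d
      = (List.lookup t (L.flatMap (fun p => p.2.map (fun v => (v, p.1))))).getD d := by
  induction L with
  | nil => simp [pvLoopA]
  | cons p rest ih =>
    obtain ⟨c, vs⟩ := p
    simp only [pvLoopA, List.flatMap_cons, pv_lookup_group]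
    by_cases h : t ∈ vs <;> simp [h, ih]

-- no pair carries key t → no match
theorem pv_lookup_none (l : List (String × String)) (t : String)
    (h : ∀ p ∈ l, p.1 ≠ t) : List.lookup t l = none := by
  induction l with
  | nil => rfl
  | cons p l ih =>
    have hb : (t == p.1) = false := beq_false_of_ne (fun he => h p (by simp) he.symm)
    simp [List.lookup, hb, ih (fun q hq => h q (by simp [hq]))]

-- lookup is determined by membership when keys are unique, hence stable under permutation
theorem pv_lookup_perm (l l' : List (String × String)) (hp : l.Perm l')
    (hn : (l.map Prod.fst).Nodup) (t : String) :
    List.lookup t l = List.lookup t l' := by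
  induction hp with
  | nil => rfl
  | cons x h ih =>
    have hn' : ((List.map Prod.fst _).Nodup) := (List.nodup_cons.mp (by simpa using hn)).2
    cases hbe : (t == x.1) <;> simp [List.lookup, hbe, ih hn']
  | swap x y l =>
    have hxy : y.1 ≠ x.1 := by
      have h := hn; simp at h; exact h.1.1
    by_cases h1 : t = y.1
    · have hb1 : (t == y.1) = true := beq_iff_eq.mpr h1
      have hb2 : (t == x.1) = false := beq_false_of_ne (h1 ▸ hxy)
      simp [List.lookup, hb1, hb2]
    · cases hb2 : (t == x.1) <;>
        simp [List.lookup, hb2, beq_false_of_ne h1]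
  | trans h₁ h₂ ih₁ ih₂ =>
    exact (ih₁ hn).trans (ih₂ (((h₁.map Prod.fst).nodup_iff).mp hn))

-- bisect invariant on a key-monotone table: result r ∈ [lo, hi], keys below r are < t,
-- keys in [r, hi) are ≥ t
theorem pvBisect_spec (T : List (String × String)) (t : String) (lo hi : Nat)
    (h1 : hi ≤ T.length) (h2 : lo ≤ hi)
    (hmono : ∀ i j, i ≤ j → j < T.length →
      (T.getD i ("", "")).1 ≤ (T.getD j ("", "")).1) :
    lo ≤ pvBisect T t lo hi ∧ pvBisect T t lo hi ≤ hi ∧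
      (∀ i, lo ≤ i → i < pvBisect T t lo hi → (T.getD i ("", "")).1 < t) ∧
      (∀ i, pvBisect T t lo hi ≤ i → i < hi → ¬ (T.getD i ("", "")).1 < t) := by
  revert h1 h2
  fun_induction pvBisect T t lo hi with
  | case1 lo hi h mid hlt ih =>
    intro h1 h2
    obtain ⟨i1, i2, i3, i4⟩ := ih h1 (by omega)
    refine ⟨by omega, i2, ?_, i4⟩
    intro i hloi hilt
    by_cases hc : i ≤ mid
    · exact lt_of_le_of_lt (hmono i mid hc (by omega)) hlt
    · exact i3 i (by omega) hilt
  | case2 lo hi h mid hge ih =>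
    intro h1 h2
    obtain ⟨i1, i2, i3, i4⟩ := ih (by omega) (by omega)
    refine ⟨i1, by omega, i3, ?_⟩
    intro i hri hihi
    by_cases hc : i < mid
    · exact i4 i hri hc
    · intro hlt
      exact hge (lt_of_le_of_lt (hmono mid i (by omega) (by omega)) hlt)
  | case3 lo hi h =>
    intro h1 h2
    exact ⟨le_refl _, h2, fun i hA hB => by omega, fun i hA hB => by omega⟩

-- on a strictly key-sorted list, a split point determines the lookup result
theorem pv_lookup_of_split (T : List (String × String)) (t : String) (r : Nat)
    (hs : T.Pairwise (fun a b => a.1 < b.1))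
    (hr : r ≤ T.length)
    (hlow : ∀ i, i < r → (T.getD i ("", "")).1 < t)
    (hhigh : ∀ i, r ≤ i → i < T.length → ¬ (T.getD i ("", "")).1 < t) :
    List.lookup t T = if r < T.length ∧ (T.getD r ("", "")).1 = t
      then some (T.getD r ("", "")).2 else none := by
  induction T generalizing r with
  | nil => simp
  | cons p T ih =>
    cases r with
    | zero =>
      have h0 : ¬ p.1 < t := by simpa using hhigh 0 (Nat.zero_le _) (by simp)
      by_cases he : p.1 = t
      · have hb : (t == p.1) = true := beq_iff_eq.mpr he.symm
        simp [List.lookup, he]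
      · have hgt : t < p.1 := lt_of_le_of_ne (le_of_not_gt h0) (fun hh => he hh.symm)
        have hnone : List.lookup t (p :: T) = none := by
          refine pv_lookup_none _ _ ?_
          intro q hq
          rcases List.mem_cons.mp hq with rfl | hq'
          · exact he
          · have : p.1 < q.1 := (List.pairwise_cons.mp hs).1 q hq'
            exact fun hqe => absurd (hqe ▸ this) (lt_asymm hgt)
        simp [hnone, he]
    | succ r' =>
      have h0 : p.1 < t := by simpa using hlow 0 (Nat.succ_pos _)
      have hb : (t == p.1) = false := beq_false_of_ne (fun hh => lt_irrefl t (hh ▸ h0))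
      have ih' := ih r' (List.pairwise_cons.mp hs).2 (by simpa using hr)
        (fun i hi => by simpa using hlow (i + 1) (by omega))
        (fun i hge hlt => by simpa using hhigh (i + 1) (by omega) (by simpa using hlt))
      simp only [List.lookup, hb]
      rw [ih']
      simp

-- strict key order gives the monotone hypothesis pvBisect_spec needs
theorem pv_mono (T : List (String × String))
    (hs : T.Pairwise (fun a b => a.1 < b.1)) :
    ∀ i j, i ≤ j → j < T.length → (T.getD i ("", "")).1 ≤ (T.getD j ("", "")).1 := by
  intro i j hij hj
  rcases Nat.eq_or_lt_of_le hij with rfl | h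
  · exact le_refl _
  · have hi : i < T.length := lt_trans h hj
    have hlt := List.pairwise_iff_getElem.mp hs i j hi hj h
    rw [List.getD_eq_getElem _ _ hi, List.getD_eq_getElem _ _ hj]
    exact le_of_lt hlt

-- the 33 variation strings are globally distinct …
set_option maxRecDepth 100000 in
set_option maxHeartbeats 2000000 in
theorem pv_flat_nodup : (pvFlat.map Prod.fst).Nodup := by decide

-- … so the sort's weak key order is strict on the table
theorem pv_table_pairwise : pvTABLE.Pairwise (fun a b => a.1 < b.1) := by
  have hperm : pvFlat.Perm pvTABLE := (PySem.List.sorted_perm _ _ _).symm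
  have htn : (pvTABLE.map Prod.fst).Nodup := ((hperm.map Prod.fst).nodup_iff).mp pv_flat_nodup
  have hle : pvTABLE.Pairwise (fun a b => a.1 ≤ b.1) :=
    PySem.List.sorted_pairwise pvFlat (fun p => p.1)
  have hne : pvTABLE.Pairwise (fun a b => a.1 ≠ b.1) := List.pairwise_map.mp htn
  exact (hle.and hne).imp (fun h => lt_of_le_of_ne h.1 h.2)

-- A's scan = B's binary search over the sorted table, for every query t and default d
theorem pv_core (t d : String) :
    pvLoopA PLAYER_MAPPINGS t d =
      (if pvBisect pvTABLE t 0 pvTABLE.length < pvTABLE.length ∧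
          (pvTABLE.getD (pvBisect pvTABLE t 0 pvTABLE.length) ("", "")).1 = t
        then (pvTABLE.getD (pvBisect pvTABLE t 0 pvTABLE.length) ("", "")).2
        else d) := by
  have hperm : pvFlat.Perm pvTABLE := (PySem.List.sorted_perm _ _ _).symm
  have hmono := pv_mono pvTABLE pv_table_pairwise
  obtain ⟨b1, b2, b3, b4⟩ :=
    pvBisect_spec pvTABLE t 0 pvTABLE.length (le_refl _) (Nat.zero_le _) hmono
  have hl := pv_lookup_of_split pvTABLE t _ pv_table_pairwise b2
    (fun i hi => b3 i (Nat.zero_le _) hi) b4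
  rw [pvLoopA_eq_flat]
  have hfe : List.flatMap (fun p => List.map (fun v => (v, p.1)) p.2) PLAYER_MAPPINGS = pvFlat := rfl
  rw [hfe, pv_lookup_perm pvFlat pvTABLE hperm pv_flat_nodup t, hl]
  by_cases hc : pvBisect pvTABLE t 0 pvTABLE.length < pvTABLE.length ∧
      (pvTABLE.getD (pvBisect pvTABLE t 0 pvTABLE.length) ("", "")).1 = t <;>
    simp [hc] <;> split_ifs <;> simp

-- ===== VERDICT (by name: the statement is the Claim_ definition above) =====
theorem normalize_player_name_spec : Claim_equal_normalize_player_name := by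
  intro name _
  unfold Spec_normalize_player_name normalize_player_name normalize_player_name_alt
  cases name with
  | none => rfl
  | some s =>
    by_cases h : s = ""
    · simp [h]
    · simp only [h, if_false]
      rw [pv_core (PySem.Str.strip (PySem.Str.lower s)) (PySem.Str.strip s)]
      by_cases hc : pvBisect pvTABLE (PySem.Str.strip (PySem.Str.lower s)) 0 pvTABLE.length < pvTABLE.length ∧
          (pvTABLE.getD (pvBisect pvTABLE (PySem.Str.strip (PySem.Str.lower s)) 0 pvTABLE.length) ("", "")).1
            = PySem.Str.strip (PySem.Str.lower s) <;>
        simp [hc] <;> split_ifs <;> simp
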